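-- pv_equiv track=rewrite | github.com/berlinium1/LAB9 | functions.py | creating_strings
-- ===== SOURCE A (Python) =====
-- def creating_strings(list1, list2, sep):
--     word=""
--     for i in list1:
--         flag = 0
--         for j in sep:
--             if i==j:
--                  flag=1
--         if flag==0:
--             word+=i
--         else:
--             list2.append(word)
--             word=""
--     list2.append(word)
--     return list2
-- ===== SOURCE B (Python) =====
-- def creating_strings(list1, list2, sep):
--     s = ''.join(list1)
--     if sep:
--         seps = ''.join(sep)
--         sentinel = seps[0]
--         table = {ord(c): sentinel for c in seps}
--         list2.extend(s.translate(table).split(sentinel))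
--     else:
--         list2.append(s)
--     return list2
-- ===== Notes on version B (the rewrite author's own statement) =====
-- stated objective: faster
-- what changed: A scans the whole separator string once per character while growing word by repeated concatenation; B translates every separator char to one sentinel with str.translate and splits once with str.split (empty sep handled by appending the whole string), extending list2 with the pieces.
import Mathlib
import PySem

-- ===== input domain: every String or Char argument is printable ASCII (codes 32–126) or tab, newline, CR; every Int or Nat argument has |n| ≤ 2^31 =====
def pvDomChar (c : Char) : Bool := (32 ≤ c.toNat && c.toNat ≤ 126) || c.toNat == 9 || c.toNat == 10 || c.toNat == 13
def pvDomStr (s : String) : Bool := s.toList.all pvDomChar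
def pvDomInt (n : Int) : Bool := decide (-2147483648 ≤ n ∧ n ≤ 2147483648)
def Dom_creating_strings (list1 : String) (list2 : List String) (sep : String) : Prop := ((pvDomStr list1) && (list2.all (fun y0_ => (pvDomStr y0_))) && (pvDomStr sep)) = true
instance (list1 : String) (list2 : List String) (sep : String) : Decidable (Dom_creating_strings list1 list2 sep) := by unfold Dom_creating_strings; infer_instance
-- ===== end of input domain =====

-- B replaces A's nested char-by-char loops by translating every separator char to one
-- sentinel and splitting on it with one library split call; B mutates list2 (extend/append) like A.

-- ===== PORT A =====
-- A: accumulate `word`; for each char scan all of sep setting `flag`; flush word on flag=1.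
def creating_strings (list1 : String) (list2 : List String) (sep : String) : List String :=
  let st := list1.toList.foldl (fun (st : List String × List Char) i =>
    let flag := sep.toList.foldl (fun f j => if i = j then 1 else f) (0 : Int)
    if flag = 0 then (st.1, st.2 ++ [i])
    else (st.1 ++ [String.ofList st.2], []))
    (list2, [])
  st.1 ++ [String.ofList st.2]

-- ===== PORT B =====
-- B: map every sep char to the sentinel sep[0], then split on the sentinel
-- (str.translate / str.split(1-char sep) ported as List.map / List.splitOn on code points).
def creating_strings_alt (list1 : String) (list2 : List String) (sep : String) : List String :=
  match sep.toList with
  | [] => list2 ++ [list1]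
  | sentinel :: _ =>
    let t := list1.toList.map (fun c => if c ∈ sep.toList then sentinel else c)
    list2 ++ (List.splitOn sentinel t).map String.ofList

-- ===== PRECONDITION & SPEC =====
def Spec_creating_strings (list1 : String) (list2 : List String) (sep : String) (out : List String) : Prop := out = creating_strings_alt list1 list2 sep
instance (list1 : String) (list2 : List String) (sep : String) (out : List String) : Decidable (Spec_creating_strings list1 list2 sep out) := by unfold Spec_creating_strings; infer_instance

-- ===== CLAIM (what is proved, stated in full; the proofs are below) =====
def Claim_equal_creating_strings : Prop := ∀ (list1 : String) (list2 : List String) (sep : String), Dom_creating_strings list1 list2 sep → Spec_creating_strings list1 list2 sep (creating_strings list1 list2 sep)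

-- ===== LEMMAS AND PROOFS =====

-- A's inner flag loop computes membership of i in sep.
theorem flag_loop_eq (sepl : List Char) (i : Char) (a : Int) :
    sepl.foldl (fun f j => if i = j then 1 else f) a
      = if i ∈ sepl then 1 else a := by
  induction sepl generalizing a with
  | nil => simp
  | cons j js ih =>
    rw [List.foldl_cons, ih]
    by_cases h : i = j <;> simp [h]

-- A's step function, with the flag loop replaced by the membership test it computes.
theorem stepA_eq (sepl : List Char) :
    (fun (st : List String × List Char) i =>
      let flag := sepl.foldl (fun f j => if i = j then 1 else f) (0 : Int)
      if flag = 0 then (st.1, st.2 ++ [i])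
      else (st.1 ++ [String.ofList st.2], []))
    = (fun (st : List String × List Char) i =>
      if i ∈ sepl then (st.1 ++ [String.ofList st.2], ([] : List Char))
      else (st.1, st.2 ++ [i])) := by
  funext st i
  simp only [flag_loop_eq]
  by_cases h : i ∈ sepl <;> simp [h]

-- A's outer loop, characterised by splitOnP on the membership predicate.
theorem loopA_eq (sepl : List Char) (cs : List Char) (acc : List String) (w : List Char) :
    (cs.foldl (fun (st : List String × List Char) i =>
        if i ∈ sepl then (st.1 ++ [String.ofList st.2], ([] : List Char))
        else (st.1, st.2 ++ [i])) (acc, w)).1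
      ++ [String.ofList (cs.foldl (fun (st : List String × List Char) i =>
        if i ∈ sepl then (st.1 ++ [String.ofList st.2], ([] : List Char))
        else (st.1, st.2 ++ [i])) (acc, w)).2]
    = acc ++ ((List.splitOnP (fun c => decide (c ∈ sepl)) cs).modifyHead (w ++ ·)).map String.ofList := by
  induction cs generalizing acc w with
  | nil => simp [List.splitOnP_nil]
  | cons c cs ih =>
    simp only [List.foldl_cons, List.splitOnP_cons]
    by_cases h : c ∈ sepl
    · simp only [h, if_true, decide_true]
      rw [ih]
      rcases List.splitOnP (fun c => decide (c ∈ sepl)) cs with _ | ⟨p, ps⟩ <;> simp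
    · simp only [h, if_false, decide_false]
      rw [ih]
      rcases List.splitOnP (fun c => decide (c ∈ sepl)) cs with _ | ⟨p, ps⟩ <;> simp
  
-- B's translate-then-split equals splitOnP on the membership predicate.
theorem translate_split_eq (sepl : List Char) (x : Char) (hx : x ∈ sepl) (cs : List Char) :
    List.splitOn x (cs.map (fun c => if c ∈ sepl then x else c))
      = List.splitOnP (fun c => decide (c ∈ sepl)) cs := by
  induction cs with
  | nil => simp [List.splitOn, List.splitOnP_nil]
  | cons c cs ih =>
    by_cases h : c ∈ sepl
    · simp only [List.splitOn, List.map_cons, h, if_true, List.splitOnP_cons, beq_self_eq_true,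
        decide_true] at ih ⊢
      rw [ih]
    · have hne : (c == x) = false := by
        simp only [beq_eq_false_iff_ne]; intro he; exact h (he ▸ hx)
      simp only [List.splitOn, List.map_cons, h, if_false, List.splitOnP_cons, hne,
        decide_false] at ih ⊢
      exact congrArg (List.modifyHead (List.cons c)) ih

-- A predicate that is false everywhere splits nothing.
theorem splitOnP_false (p : Char → Bool) (hp : ∀ c, p c = false) (cs : List Char) :
    List.splitOnP p cs = [cs] := by
  induction cs with
  | nil => simp [List.splitOnP_nil]
  | cons c cs ih => simp [List.splitOnP_cons, hp, ih]

-- ===== VERDICT (by name: the statement is the Claim_ definition above) =====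
theorem creating_strings_spec : Claim_equal_creating_strings := by
  intro list1 list2 sep _
  unfold Spec_creating_strings creating_strings creating_strings_alt
  simp only [stepA_eq]
  rcases hsep : sep.toList with _ | ⟨x, xs⟩
  · rw [loopA_eq, splitOnP_false _ (by simp)]
    simp
  · rw [loopA_eq, ← translate_split_eq (x :: xs) x (by simp)]
    have hid : ∀ (l : List (List Char)), l.modifyHead (fun y => y) = l := by
      intro l; cases l <;> simp
    simp [hid]
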